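-- pv_equiv track=rewrite | github.com/CadreAI/parsec_slides_app | backend/python/iready/iready_filters.py | should_generate_subject
-- ===== SOURCE A (Python) =====
-- def should_generate_subject(subject, filters):
--     """Check if a subject should be generated based on filters"""
--     if not filters or filters.get("subjects") is None or len(filters.get("subjects", [])) == 0:
--         return True  # Generate all if no filter
--
--     # iReady uses "ELA" and "Math" instead of "Reading" and "Mathematics"
--     subject_map = {"Math": ["Math", "Mathematics"], "ELA": ["ELA", "Reading"]}
--     # Normalize filter values and subject name
--     filter_subjects = [str(s).strip() for s in filters["subjects"]]
--     subject_normalized = str(subject).strip()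
--
--     # Check if subject matches directly or through mapping
--     if subject_normalized in filter_subjects:
--         return True
--     if subject_normalized in subject_map:
--         for mapped_name in subject_map[subject_normalized]:
--             if mapped_name in filter_subjects:
--                 return True
--     return False
-- ===== SOURCE B (Python) =====
-- def should_generate_subject(subject, filters):
--     """Check if a subject should be generated based on filters.
--
--     Single streaming pass over the raw filter entries: each entry matches if it
--     equals the normalized subject or if its canonical form (via a reverse alias
--     map) does; no normalized filter list or candidate set is ever built.
--     """
--     if not filters or filters.get("subjects") is None or len(filters.get("subjects", [])) == 0:
--         return True  # Generate all if no filter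
--     canonical = {"Mathematics": "Math", "Reading": "ELA"}
--     name = str(subject).strip()
--     for raw in filters["subjects"]:
--         entry = str(raw).strip()
--         if entry == name or canonical.get(entry) == name:
--             return True
--     return False
-- ===== Notes on version B (the rewrite author's own statement) =====
-- stated objective: simpler
-- what changed: Inverts the matching direction: instead of normalizing the whole filter list and checking the subject plus its forward-mapped aliases against it, B makes one streaming pass over the raw filter entries with early return, matching each entry via a reverse canonical-alias map (Mathematics->Math, Reading->ELA).
import Mathlib
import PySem

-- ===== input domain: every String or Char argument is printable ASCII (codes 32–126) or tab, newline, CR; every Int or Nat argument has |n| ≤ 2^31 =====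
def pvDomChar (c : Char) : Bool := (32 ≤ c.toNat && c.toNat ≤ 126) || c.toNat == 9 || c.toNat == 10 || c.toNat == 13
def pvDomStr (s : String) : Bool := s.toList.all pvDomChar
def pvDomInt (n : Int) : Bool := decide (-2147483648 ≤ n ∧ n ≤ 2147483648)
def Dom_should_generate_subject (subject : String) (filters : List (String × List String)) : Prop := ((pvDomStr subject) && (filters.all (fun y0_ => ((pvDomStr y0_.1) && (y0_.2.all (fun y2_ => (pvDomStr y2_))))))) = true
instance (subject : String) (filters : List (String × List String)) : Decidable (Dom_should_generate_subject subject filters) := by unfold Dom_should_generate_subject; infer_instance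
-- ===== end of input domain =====

-- B inverts the matching direction: one streaming pass over the raw filter entries with early
-- return, matching each entry via a reverse canonical-alias map (objective: simpler).

-- dict.get on the association list (first match), shared lookup primitive
def pvLookup (filters : List (String × List String)) (k : String) : Option (List String) :=
  (filters.find? (fun p => p.1 == k)).map (·.2)

-- ===== PORT A =====
def should_generate_subject (subject : String) (filters : List (String × List String)) : Bool :=
  if filters.isEmpty || (pvLookup filters "subjects").isNone
      || ((pvLookup filters "subjects").getD []).length == 0 then
    true
  else
    let filter_subjects := ((pvLookup filters "subjects").getD []).map PySem.Str.strip
    let subject_normalized := PySem.Str.strip subject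
    if filter_subjects.contains subject_normalized then true
    else if subject_normalized == "Math" then
      -- for mapped_name in subject_map["Math"]: …
      (["Math", "Mathematics"].any (fun m => filter_subjects.contains m))
    else if subject_normalized == "ELA" then
      (["ELA", "Reading"].any (fun m => filter_subjects.contains m))
    else false

-- ===== PORT B =====
-- canonical.get(entry)
def pvCanonical (entry : String) : Option String :=
  if entry == "Mathematics" then some "Math"
  else if entry == "Reading" then some "ELA"
  else none

-- the streaming pass with early return over the raw filter entries
def pvScan (name : String) : List String → Bool
  | [] => false
  | raw :: rest =>
      let entry := PySem.Str.strip raw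
      if entry == name || pvCanonical entry == some name then true else pvScan name rest

def should_generate_subject_alt (subject : String) (filters : List (String × List String)) : Bool :=
  if filters.isEmpty || (pvLookup filters "subjects").isNone
      || ((pvLookup filters "subjects").getD []).length == 0 then
    true
  else
    pvScan (PySem.Str.strip subject) ((pvLookup filters "subjects").getD [])

-- ===== PRECONDITION & SPEC =====
def Spec_should_generate_subject (subject : String) (filters : List (String × List String)) (out : Bool) : Prop := out = should_generate_subject_alt subject filters
instance (subject : String) (filters : List (String × List String)) (out : Bool) : Decidable (Spec_should_generate_subject subject filters out) := by unfold Spec_should_generate_subject; infer_instance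

-- ===== CLAIM =====
def Claim_equal_should_generate_subject : Prop := ∀ (subject : String) (filters : List (String × List String)), Dom_should_generate_subject subject filters → Spec_should_generate_subject subject filters (should_generate_subject subject filters)

-- ===== LEMMAS AND PROOFS =====

-- the scan succeeds iff some stripped entry equals the name or canonicalizes to it
theorem pvScan_iff (name : String) (fs : List String) :
    pvScan name fs = true ↔
      ∃ f ∈ fs.map PySem.Str.strip, (f = name ∨ pvCanonical f = some name) := by
  induction fs with
  | nil => simp [pvScan]
  | cons r rest ih =>
    simp only [pvScan]
    split_ifs with h
    · simp only [List.map_cons, List.mem_cons, true_iff]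
      have h' : PySem.Str.strip r = name ∨ pvCanonical (PySem.Str.strip r) = some name := by
        simpa using h
      exact ⟨PySem.Str.strip r, Or.inl rfl, h'⟩
    · have h' : ¬(PySem.Str.strip r = name ∨ pvCanonical (PySem.Str.strip r) = some name) := by
        simpa using h
      rw [ih]
      simp only [List.map_cons, List.mem_cons]
      constructor
      · rintro ⟨f, hf, hm⟩; exact ⟨f, Or.inr hf, hm⟩
      · rintro ⟨f, rfl | hf, hm⟩
        · exact absurd hm h'
        · exact ⟨f, hf, hm⟩

-- A's membership-plus-alias body, characterized by the same existential
theorem body_iff (name : String) (L : List String) :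
    (if L.contains name then true
     else if name == "Math" then (["Math", "Mathematics"].any (fun m => L.contains m))
     else if name == "ELA" then (["ELA", "Reading"].any (fun m => L.contains m))
     else false) = true ↔ ∃ f ∈ L, (f = name ∨ pvCanonical f = some name) := by
  constructor
  · intro h
    split_ifs at h with h1 h2 h3
    · exact ⟨name, by simpa using h1, Or.inl rfl⟩
    · have h2' : name = "Math" := by simpa using h2
      subst h2'
      have : "Math" ∈ L ∨ "Mathematics" ∈ L := by simpa using h
      rcases this with hm | hm
      · exact ⟨"Math", hm, Or.inl rfl⟩
      · exact ⟨"Mathematics", hm, Or.inr rfl⟩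
    · have h3' : name = "ELA" := by simpa using h3
      subst h3'
      have : "ELA" ∈ L ∨ "Reading" ∈ L := by simpa using h
      rcases this with hm | hm
      · exact ⟨"ELA", hm, Or.inl rfl⟩
      · exact ⟨"Reading", hm, Or.inr rfl⟩
  · rintro ⟨f, hf, rfl | hm⟩
    · simp [hf]
    · unfold pvCanonical at hm
      split_ifs at hm with hMa hRe
      · have hf' : f = "Mathematics" := by simpa using hMa
        have hn : name = "Math" := (Option.some.inj hm).symm
        subst hf'; subst hn
        simp only [List.contains_iff_mem]
        simp
        tauto
      · have hf' : f = "Reading" := by simpa using hRe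
        have hn : name = "ELA" := (Option.some.inj hm).symm
        subst hf'; subst hn
        simp only [List.contains_iff_mem]
        simp
        tauto

theorem body_eq (name : String) (fs : List String) :
    (if (fs.map PySem.Str.strip).contains name then true
     else if name == "Math" then (["Math", "Mathematics"].any (fun m => (fs.map PySem.Str.strip).contains m))
     else if name == "ELA" then (["ELA", "Reading"].any (fun m => (fs.map PySem.Str.strip).contains m))
     else false) = pvScan name fs := by
  rw [Bool.eq_iff_iff]
  exact (body_iff name (fs.map PySem.Str.strip)).trans (pvScan_iff name fs).symm

theorem should_generate_subject_spec : Claim_equal_should_generate_subject := by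
  intro subject filters _
  unfold Spec_should_generate_subject should_generate_subject should_generate_subject_alt
  split_ifs with h
  · rfl
  · exact body_eq (PySem.Str.strip subject) _
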